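-- pv_equiv track=rewrite | github.com/Jackwmtr/radwareDumper | dpwall.py | get_free_spotes
-- ===== SOURCE A (Python) =====
-- def get_free_spotes(arr):
--     cur_index = []  # make and populate a list with current seqNo
--     for group in arr:
--         cur_index.append(group[0])
--     free = []  # free index list
--     for z in range(0, 250):
--         if z not in cur_index:  # if current list index is not in current index list - add to free index list
--             free.append(z)
--     return free
-- ===== SOURCE B (Python) =====
-- def get_free_spotes(arr):
--     used = sorted({g[0] for g in arr if 0 <= g[0] < 250})
--     free = []
--     prev = 0
--     for u in used:
--         free.extend(range(prev, u))
--         prev = u + 1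
--     free.extend(range(prev, 250))
--     return free
-- ===== Notes on version B (the rewrite author's own statement) =====
-- stated objective: alternative
-- what changed: B replaces A's range(250) scan with a per-candidate membership test by a sort-then-gap-walk: it sorts the distinct used first elements lying in [0,250) and emits the gaps between consecutive used values (and before the first / after the last), so no membership test over the candidate range remains.
import Mathlib
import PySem

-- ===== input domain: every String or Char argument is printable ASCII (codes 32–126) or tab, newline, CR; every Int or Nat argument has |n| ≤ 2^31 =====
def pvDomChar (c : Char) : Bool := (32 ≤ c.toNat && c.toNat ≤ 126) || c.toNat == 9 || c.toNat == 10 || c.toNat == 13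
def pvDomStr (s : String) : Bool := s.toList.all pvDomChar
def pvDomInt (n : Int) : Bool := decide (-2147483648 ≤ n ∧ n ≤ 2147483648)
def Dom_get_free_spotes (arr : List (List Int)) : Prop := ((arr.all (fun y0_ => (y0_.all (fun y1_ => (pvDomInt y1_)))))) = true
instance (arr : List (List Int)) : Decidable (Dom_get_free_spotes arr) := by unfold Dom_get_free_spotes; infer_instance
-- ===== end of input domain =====

-- B replaces A's range(250) scan-and-membership-test by a sort-then-gap-walk over the used first elements; objective: alternative.

-- ===== PORT A =====
-- group[0] is ported as (pyGet? group 0).getD 0: Pre_ guarantees every group is nonempty,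
-- so the getD default is never used on admitted inputs (Python raises IndexError on []).
def get_free_spotes (arr : List (List Int)) : List Int :=
  let cur_index := arr.foldl (fun acc group => acc ++ [(PySem.List.pyGet? group 0).getD 0]) []
  (PySem.List.pyRange 0 250 1).foldl
    (fun free z => if !(cur_index.contains z) then free ++ [z] else free) []

-- ===== PORT B =====
def get_free_spotes_alt (arr : List (List Int)) : List Int :=
  let used : List Int :=
    PySem.List.sorted
      (PySem.Set.ofList ((arr.map (fun g => (PySem.List.pyGet? g 0).getD 0)).filter
        (fun x => decide (0 ≤ x) && decide (x < 250))))
      (fun x => x)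
  let st := used.foldl
    (fun (st : List Int × Int) u => (st.1 ++ PySem.List.pyRange st.2 u 1, u + 1)) ([], 0)
  st.1 ++ PySem.List.pyRange st.2 250 1

-- ===== PRECONDITION & SPEC =====
-- Pre_ excludes arrays containing an empty group, on which Python's group[0] raises IndexError (in A and B alike).
def Pre_get_free_spotes (arr : List (List Int)) : Prop := (arr.all (fun g => !g.isEmpty)) = true
instance (arr : List (List Int)) : Decidable (Pre_get_free_spotes arr) := by unfold Pre_get_free_spotes; infer_instance
def pvWitness_get_free_spotes : List (List Int) := [[3, 7], [0], [249, 1]]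
def Spec_get_free_spotes (arr : List (List Int)) (out : List Int) : Prop := out = get_free_spotes_alt arr
instance (arr : List (List Int)) (out : List Int) : Decidable (Spec_get_free_spotes arr out) := by unfold Spec_get_free_spotes; infer_instance

-- ===== CLAIM (what is proved, stated in full; the proofs are below) =====
def Claim_equal_get_free_spotes : Prop := ∀ (arr : List (List Int)), Dom_get_free_spotes arr → Pre_get_free_spotes arr → Spec_get_free_spotes arr (get_free_spotes arr)

-- ===== LEMMAS AND PROOFS =====

-- The gap-walk over a strictly increasing list of used values in [prev, 250) produces
-- exactly the candidates of [prev, 250) that are not used.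
lemma pv_gap_walk (us : List Int) : ∀ (acc : List Int) (prev : Int),
    List.Pairwise (· < ·) us → (∀ u ∈ us, prev ≤ u ∧ u < 250) →
    (us.foldl (fun (st : List Int × Int) u => (st.1 ++ PySem.List.pyRange st.2 u 1, u + 1)) (acc, prev)).1
      ++ PySem.List.pyRange
          (us.foldl (fun (st : List Int × Int) u => (st.1 ++ PySem.List.pyRange st.2 u 1, u + 1)) (acc, prev)).2 250 1
    = acc ++ (PySem.List.pyRange prev 250 1).filter (fun z => !us.contains z) := by
  induction us with
  | nil =>
      intro acc prev _ _
      simp [List.foldl]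
  | cons u us ih =>
      intro acc prev hpw hb
      obtain ⟨hu1, hu2⟩ := hb u (by simp)
      have hlt : ∀ x ∈ us, u < x := by
        intro x hx; exact (List.pairwise_cons.mp hpw).1 x hx
      simp only [List.foldl_cons]
      rw [ih (acc ++ PySem.List.pyRange prev u 1) (u + 1)
            (List.pairwise_cons.mp hpw).2
            (by intro x hx; exact ⟨by have := hlt x hx; omega, (hb x (by simp [hx])).2⟩)]
      rw [PySem.List.pyRange_one_append prev u 250 hu1 (by omega),
          PySem.List.pyRange_one_cons (by omega : u < (250:Int))]
      rw [List.filter_append]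
      have h1 : (PySem.List.pyRange prev u 1).filter (fun z => !(u :: us).contains z)
          = PySem.List.pyRange prev u 1 := by
        apply List.filter_eq_self.mpr
        intro z hz
        have hz' := PySem.List.mem_pyRange_one.mp hz
        have : z ∉ us := fun h => absurd (hlt z h) (by omega)
        simp_all [List.contains_eq_mem]
        omega
      have h2 : (u :: PySem.List.pyRange (u + 1) 250 1).filter (fun z => !(u :: us).contains z)
          = (PySem.List.pyRange (u + 1) 250 1).filter (fun z => !us.contains z) := by
        rw [List.filter_cons]
        rw [if_neg (by simp)]
        apply List.filter_congr
        intro z hz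
        have hz' := PySem.List.mem_pyRange_one.mp hz
        simp [List.contains_eq_mem]
        intro h; omega
      rw [h1, h2, List.append_assoc]

-- ===== VERDICT (by name: the statement is the Claim_ definition above) =====
theorem get_free_spotes_spec : Claim_equal_get_free_spotes := by
  intro arr _ _
  unfold Spec_get_free_spotes get_free_spotes get_free_spotes_alt
  rw [PySem.List.foldl_append_singleton_eq_map, PySem.List.foldl_append_if_eq_filter]
  simp only [List.nil_append]
  set cur := arr.map (fun g => (PySem.List.pyGet? g 0).getD 0) with hcur
  set used := PySem.List.sorted
      (PySem.Set.ofList (cur.filter (fun x => decide (0 ≤ x) && decide (x < 250)))) (fun x => x) with hused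
  have hpw : List.Pairwise (· < ·) used := PySem.List.sorted_ofList_pairwise_lt _
  have hbd : ∀ u ∈ used, (0:Int) ≤ u ∧ u < 250 := by
    intro u hu
    rw [hused, PySem.List.mem_sorted, PySem.Set.mem_ofList, List.mem_filter] at hu
    simpa using hu.2
  have := pv_gap_walk used [] 0 hpw hbd
  simp only [List.nil_append] at this
  rw [this]
  apply List.filter_congr
  intro z hz
  have hz' := PySem.List.mem_pyRange_one.mp hz
  have : z ∈ used ↔ z ∈ cur := by
    rw [hused, PySem.List.mem_sorted, PySem.Set.mem_ofList, List.mem_filter]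
    constructor
    · exact fun h => h.1
    · intro h; exact ⟨h, by simp; omega⟩
  simp [List.contains_eq_mem, this]
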